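-- pv_equiv track=rewrite | github.com/glyphh-ai/model-bfcl | archive/2026-03-09-pre-clean-run/debug_scripts/debug_clean_llm.py | _restore_dot_name
-- ===== SOURCE A (Python) =====
-- def _restore_dot_name(name: str) -> str:
--     """Restore GorillaFileSystem_cd to GorillaFileSystem.cd etc."""
--     # Known class prefixes
--     prefixes = [
--         "GorillaFileSystem", "TwitterAPI", "PostingAPI", "MessageAPI",
--         "TicketAPI", "MathAPI", "TradingBot", "TravelAPI", "VehicleControlAPI",
--     ]
--     for prefix in prefixes:
--         if name.startswith(prefix + "_"):
--             method = name[len(prefix) + 1:]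
--             return f"{prefix}.{method}"
--     return name
-- ===== SOURCE B (Python) =====
-- _PREFIXES = frozenset(
--     "GorillaFileSystem TwitterAPI PostingAPI MessageAPI "
--     "TicketAPI MathAPI TradingBot TravelAPI VehicleControlAPI".split()
-- )
--
--
-- def _restore_dot_name(name: str) -> str:
--     """Restore GorillaFileSystem_cd to GorillaFileSystem.cd etc."""
--     head, sep, tail = name.partition("_")
--     if sep and head in _PREFIXES:
--         return f"{head}.{tail}"
--     return name
-- ===== Notes on version B (the rewrite author's own statement) =====
-- stated objective: simpler
-- what changed: B eliminates A's linear scan of nine startswith tests: it splits the name once at the first underscore (partition) and decides with a single frozenset membership test on the extracted head (the set built once by splitting one literal string), exploiting that the known prefixes contain no underscore.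
import Mathlib
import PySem

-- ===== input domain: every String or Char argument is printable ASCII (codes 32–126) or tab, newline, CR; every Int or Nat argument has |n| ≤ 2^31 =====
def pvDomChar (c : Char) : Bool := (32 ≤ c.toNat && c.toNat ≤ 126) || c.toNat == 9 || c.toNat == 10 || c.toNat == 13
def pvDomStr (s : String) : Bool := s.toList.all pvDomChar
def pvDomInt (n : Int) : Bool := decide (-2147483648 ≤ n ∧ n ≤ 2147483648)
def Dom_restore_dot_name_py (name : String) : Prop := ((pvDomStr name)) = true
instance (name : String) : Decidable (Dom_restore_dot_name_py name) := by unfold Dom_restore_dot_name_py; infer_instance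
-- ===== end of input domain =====

-- B replaces A's linear chain of startswith tests by one split at the first underscore
-- plus a single set-membership test on the head (objective: simpler).

-- ===== PORT A =====
-- A's literal list of known class prefixes (strings kept at the PySem Chars level)
def pvPrefixesA : List (List Char) :=
  [['G', 'o', 'r', 'i', 'l', 'l', 'a', 'F', 'i', 'l', 'e', 'S', 'y', 's', 't', 'e', 'm'],
   ['T', 'w', 'i', 't', 't', 'e', 'r', 'A', 'P', 'I'],
   ['P', 'o', 's', 't', 'i', 'n', 'g', 'A', 'P', 'I'],
   ['M', 'e', 's', 's', 'a', 'g', 'e', 'A', 'P', 'I'],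
   ['T', 'i', 'c', 'k', 'e', 't', 'A', 'P', 'I'],
   ['M', 'a', 't', 'h', 'A', 'P', 'I'],
   ['T', 'r', 'a', 'd', 'i', 'n', 'g', 'B', 'o', 't'],
   ['T', 'r', 'a', 'v', 'e', 'l', 'A', 'P', 'I'],
   ['V', 'e', 'h', 'i', 'c', 'l', 'e', 'C', 'o', 'n', 't', 'r', 'o', 'l', 'A', 'P', 'I']]

-- A's 'for prefix in prefixes: if name.startswith(prefix + "_"): return …' loop
def pvLoopA : List (List Char) → String → String
  | [], name => name
  | p :: ps, name =>
      if PySem.Chars.startswith name.toList (p ++ ['_']) then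
        -- method = name[len(prefix)+1:]; return f"{prefix}.{method}"
        String.ofList (p ++ '.' :: PySem.List.slice name.toList (some ((PySem.Chars.len p : Int) + 1)) none)
      else pvLoopA ps name

def restore_dot_name_py (name : String) : String := pvLoopA pvPrefixesA name

-- ===== PORT B =====
-- B's frozenset of prefixes, built once by splitting a single literal string on whitespace
def pvPrefixSetB : PySem.Set (List Char) :=
  PySem.Set.ofList (PySem.Chars.split₀
    "GorillaFileSystem TwitterAPI PostingAPI MessageAPI TicketAPI MathAPI TradingBot TravelAPI VehicleControlAPI".toList)

def restore_dot_name_py_alt (name : String) : String :=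
  -- head, sep, tail = name.partition('_'): ported by hand; exact for the one-char separator '_'
  let cs := name.toList
  let head := cs.takeWhile (fun c => c ≠ '_')
  match cs.dropWhile (fun c => c ≠ '_') with
  | [] => name                                   -- sep == '' : no underscore in name
  | _ :: tail =>
      if head ∈ pvPrefixSetB then String.ofList (head ++ '.' :: tail)
      else name

-- ===== PRECONDITION & SPEC =====
def Spec_restore_dot_name_py (name : String) (out : String) : Prop := out = restore_dot_name_py_alt name
instance (name : String) (out : String) : Decidable (Spec_restore_dot_name_py name out) := by unfold Spec_restore_dot_name_py; infer_instance

-- ===== CLAIM (what is proved, stated in full; the proofs are below) =====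
def Claim_equal_restore_dot_name_py : Prop := ∀ (name : String), Dom_restore_dot_name_py name → Spec_restore_dot_name_py name (restore_dot_name_py name)

-- ===== LEMMAS AND PROOFS =====

-- B's split literal yields exactly A's prefix list
set_option maxRecDepth 8192 in
theorem pvSplit_eq : PySem.Chars.split₀
    "GorillaFileSystem TwitterAPI PostingAPI MessageAPI TicketAPI MathAPI TradingBot TravelAPI VehicleControlAPI".toList
    = pvPrefixesA := by decide

theorem pvMemSetB_iff (q : List Char) : q ∈ pvPrefixSetB ↔ q ∈ pvPrefixesA := by
  rw [pvPrefixSetB, pvSplit_eq]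
  exact PySem.Set.mem_ofList pvPrefixesA q

-- two underscore-free words followed by '_' can only match at the same place
theorem pvPrefix_eq {q p : List Char} {t : List Char}
    (hq : ∀ c ∈ q, c ≠ '_') (hp : ∀ c ∈ p, c ≠ '_')
    (h : q ++ ['_'] <+: p ++ '_' :: t) : q = p := by
  induction q generalizing p with
  | nil =>
    cases p with
    | nil => rfl
    | cons a p' =>
      rcases h with ⟨r, hr⟩
      simp at hr
      exact absurd hr.1.symm (hp a (by simp))
  | cons c q' ih =>
    cases p with
    | nil =>
      rcases h with ⟨r, hr⟩
      simp at hr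
      exact absurd hr.1 (hq c (by simp))
    | cons a p' =>
      rcases h with ⟨r, hr⟩
      simp at hr
      obtain ⟨hca, hrest⟩ := hr
      have : q' = p' := ih (fun c hc => hq c (by simp [hc]))
        (fun c hc => hp c (by simp [hc])) ⟨r, by simpa using hrest⟩
      simp [hca, this]

theorem pvLoopA_all_false {ps : List (List Char)} {name : String}
    (h : ∀ q ∈ ps, PySem.Chars.startswith name.toList (q ++ ['_']) = false) :
    pvLoopA ps name = name := by
  induction ps with
  | nil => rfl
  | cons q ps ih =>
    simp only [pvLoopA, h q (by simp)]
    exact ih fun r hr => h r (by simp [hr])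

theorem pvLoopA_match {ps : List (List Char)} {p t : List Char} {name : String}
    (hps : ∀ q ∈ ps, ∀ c ∈ q, c ≠ '_')
    (hp : ∀ c ∈ p, c ≠ '_')
    (hmem : p ∈ ps)
    (hcs : name.toList = p ++ '_' :: t) :
    pvLoopA ps name = String.ofList (p ++ '.' :: t) := by
  induction ps with
  | nil => simp at hmem
  | cons q ps ih =>
    by_cases hqp : q = p
    · have hsw : PySem.Chars.startswith (p ++ '_' :: t) (p ++ ['_']) = true := by
        rw [PySem.Chars.startswith_iff]
        exact ⟨t, by simp⟩
      have hlen : (PySem.Chars.len p : Int) = (p.length : Int) := by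
        simp [PySem.Chars.len_eq]
      simp only [pvLoopA, hcs, hqp, hlen, hsw, if_true]
      have hc1 : ((p.length : Int) + 1) = ((p.length + 1 : Nat) : Int) := by push_cast; ring
      rw [hc1, PySem.List.slice_from _ (by positivity)]
      simp
    · have hsw : PySem.Chars.startswith name.toList (q ++ ['_']) = false := by
        rw [Bool.eq_false_iff]
        intro hc
        rw [PySem.Chars.startswith_iff, hcs] at hc
        exact hqp (pvPrefix_eq (hps q (by simp)) hp hc)
      simp only [pvLoopA, hsw, Bool.false_eq_true, if_false]
      rcases List.mem_cons.mp hmem with h1 | h2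
      · exact absurd h1.symm hqp
      · exact ih (fun s hs => hps s (by simp [hs])) h2

theorem pvDropWhile_head {α : Type} {p : α → Bool} {l : List α} {r : α} {t : List α}
    (h : l.dropWhile p = r :: t) : p r = false := by
  induction l with
  | nil => simp at h
  | cons a l ih =>
    by_cases ha : p a
    · exact ih (by rwa [List.dropWhile_cons_of_pos ha] at h)
    · rw [List.dropWhile_cons_of_neg ha] at h
      cases h
      simpa using ha

set_option maxRecDepth 8192 in
theorem pvPrefixesA_no_underscore : ∀ q ∈ pvPrefixesA, ∀ c ∈ q, c ≠ '_' := by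
  simp [pvPrefixesA]

-- ===== VERDICT (by name: the statement is the Claim_ definition above) =====
theorem restore_dot_name_py_spec : Claim_equal_restore_dot_name_py := by
  intro name _
  unfold Spec_restore_dot_name_py restore_dot_name_py restore_dot_name_py_alt
  cases hdw : name.toList.dropWhile (fun c => c ≠ '_') with
  | nil =>
    simp only [hdw]
    apply pvLoopA_all_false
    intro q hq
    rw [Bool.eq_false_iff]
    intro hc
    rw [PySem.Chars.startswith_iff] at hc
    have hus : '_' ∈ name.toList := hc.sublist.mem (by simp)
    have := List.dropWhile_eq_nil_iff.mp hdw '_' hus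
    simp at this
  | cons r tail =>
    have hrf : (fun c => decide (c ≠ '_')) r = false := pvDropWhile_head (p := fun c => decide (c ≠ '_')) hdw
    have hr : r = '_' := by simpa using hrf
    have hcs : name.toList = (name.toList.takeWhile (fun c => c ≠ '_')) ++ '_' :: tail := by
      conv_lhs => rw [← List.takeWhile_append_dropWhile (p := fun c => decide (c ≠ '_')) (l := name.toList)]
      rw [hdw, hr]
    have hhead_free : ∀ c ∈ name.toList.takeWhile (fun c => c ≠ '_'), c ≠ '_' := by
      intro c hc
      simpa using List.mem_takeWhile_imp hc
    by_cases hmem : (name.toList.takeWhile (fun c => c ≠ '_')) ∈ pvPrefixSetB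
    · simp only [hdw, hmem, if_pos]
      exact pvLoopA_match pvPrefixesA_no_underscore hhead_free
        ((pvMemSetB_iff _).mp hmem) hcs
    · simp only [hdw, hmem, if_false]
      apply pvLoopA_all_false
      intro q hq
      rw [Bool.eq_false_iff]
      intro hc
      rw [PySem.Chars.startswith_iff, hcs] at hc
      have hqh : q = name.toList.takeWhile (fun c => c ≠ '_') :=
        pvPrefix_eq (pvPrefixesA_no_underscore q hq) hhead_free hc
      exact hmem ((pvMemSetB_iff _).mpr (hqh ▸ hq))
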